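-- pv_equiv track=rewrite | github.com/Yuktesha/prime-sum-backend | main.py | find_consecutive_prime_sums
-- ===== SOURCE A (Python) =====
-- from typing import List, Dict, Optional
--
-- def find_consecutive_prime_sums(primes: List[int], target: int, min_length: int, max_length: int) -> List[List[int]]:
--     """找出所有可以相加得到目標數的連續質數序列"""
--     sequences = []
--     n = len(primes)
--
--     for length in range(min_length, min(max_length + 1, n + 1)):
--         current_sum = sum(primes[:length])
--
--         for i in range(n - length + 1):
--             if i > 0:
--                 current_sum = current_sum - primes[i - 1] + primes[i + length - 1]
--
--             if current_sum == target:
--                 sequences.append(primes[i:i + length])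
--             elif current_sum > target:
--                 break
--
--     return sequences
-- ===== SOURCE B (Python) =====
-- def find_consecutive_prime_sums(primes, target, min_length, max_length):
--     """找出所有可以相加得到目標數的連續質數序列"""
--     n = len(primes)
--     prefix = [0]
--     for p in primes:
--         prefix.append(prefix[-1] + p)
--     seen = {}  # prefix value -> ascending list of indices where it occurred
--     hits = []
--     for j in range(n + 1):
--         for i in seen.get(prefix[j] - target, []):
--             if min_length <= j - i <= max_length:
--                 hits.append((j - i, i))
--         seen.setdefault(prefix[j], []).append(j)
--     hits.sort()
--     return [primes[i:i + length] for length, i in hits]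
-- ===== Notes on version B (the rewrite author's own statement) =====
-- stated objective: alternative
-- what changed: B drops A's length-major sliding windows (per-length rolling sum with an early break) for the hash-map subarray-sum algorithm: one pass over window ends looks up prefix_sum[j]-target in a dict mapping each prefix-sum value to its earlier indices, and the collected (length,start) hits are sorted once at the end.
-- intended difference: On inputs where some window of an allowed length sums to target but an earlier window of the same length sums to more than target (possible whenever primes is not sorted ascending), A's early break silently drops that sequence (e.g. A returns [] on ([5,1,1],2,2,2)) while B returns it ([[1,1]]), which is the documented find-all behaviour. — e.g. on find_consecutive_prime_sums([5, 1, 1], 2, 2, 2): A returns [], B returns [[1, 1]]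
-- outside the precondition, e.g. on find_consecutive_prime_sums([2, 3], 0, 0, 1): A returns [[], [], []], B returns []; on find_consecutive_prime_sums([2, 3], 5, -1, 3): A raises IndexError, B returns [[2, 3]]
import Mathlib
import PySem

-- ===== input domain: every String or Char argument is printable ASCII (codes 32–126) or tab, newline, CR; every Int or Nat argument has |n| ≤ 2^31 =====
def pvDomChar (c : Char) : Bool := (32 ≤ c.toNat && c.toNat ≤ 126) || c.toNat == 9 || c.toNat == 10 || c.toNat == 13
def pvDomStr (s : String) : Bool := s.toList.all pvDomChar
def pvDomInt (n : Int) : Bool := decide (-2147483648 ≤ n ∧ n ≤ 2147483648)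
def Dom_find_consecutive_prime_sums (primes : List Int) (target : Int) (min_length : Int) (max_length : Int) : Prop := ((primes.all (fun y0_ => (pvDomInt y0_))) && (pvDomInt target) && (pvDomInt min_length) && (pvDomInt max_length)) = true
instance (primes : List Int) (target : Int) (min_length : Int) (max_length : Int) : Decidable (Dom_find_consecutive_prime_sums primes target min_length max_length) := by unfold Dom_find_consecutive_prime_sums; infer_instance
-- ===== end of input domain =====

-- B replaces A's length-major sliding windows (rolling sum + early break) by the hash-map
-- subarray-sum algorithm (dict from prefix-sum value to its indices, hits sorted at the end);
-- where A's early break drops a later matching window, B intentionally returns it (see D_ below).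


-- ===== PORT A =====
-- inner 'for i in range(n - length + 1)' loop of A, with its rolling sum and break
def pvInnerA (primes : List Int) (target : Int) (len : Int) (is_ : List Int) (cs : Int)
    (acc : List (List Int)) : List (List Int) :=
  match is_ with
  | [] => acc
  | i :: rest =>
    let cs' := if i > 0 then
        cs - PySem.List.pyGetD primes (i - 1) 0 + PySem.List.pyGetD primes (i + len - 1) 0
      else cs
    if cs' = target then
      pvInnerA primes target len rest cs' (acc ++ [PySem.List.slice primes (some i) (some (i + len))])
    else if cs' > target then acc
    else pvInnerA primes target len rest cs' acc

def find_consecutive_prime_sums (primes : List Int) (target : Int) (min_length : Int) (max_length : Int) : List (List Int) :=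
  let n : Int := primes.length
  (PySem.List.pyRange min_length (min (max_length + 1) (n + 1)) 1).foldl
    (fun seqs len =>
      pvInnerA primes target len (PySem.List.pyRange 0 (n - len + 1) 1)
        (PySem.List.slice primes none (some len)).sum seqs) []

-- ===== PORT B =====
-- B's 'for j in range(n + 1)' loop: state = (seen dict, hits); 'seen.setdefault(v, []).append(j)'
-- is Dict.modify v [] (· ++ [j]); the inner 'for i in seen.get(...)' is the foldl over the bucket
def pvLoopB (pre : List Int) (target min_length max_length : Int) :
    List Int → PySem.Dict Int (List Int) → List (Int × Int) → PySem.Dict Int (List Int) × List (Int × Int)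
  | [], seen, hits => (seen, hits)
  | j :: rest, seen, hits =>
    let v := PySem.List.pyGetD pre j 0
    let hits' := (seen.getD (v - target) []).foldl
      (fun h i => if min_length ≤ j - i ∧ j - i ≤ max_length then h ++ [(j - i, i)] else h) hits
    pvLoopB pre target min_length max_length rest (seen.modify v [] (· ++ [j])) hits'

def find_consecutive_prime_sums_alt (primes : List Int) (target : Int) (min_length : Int) (max_length : Int) : List (List Int) :=
  let n : Int := primes.length
  let pre := primes.foldl (fun pr p => pr ++ [PySem.List.pyGetD pr (-1) 0 + p]) [0]
  let st := pvLoopB pre target min_length max_length (PySem.List.pyRange 0 (n + 1) 1) PySem.Dict.empty []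
  (PySem.List.sorted2 st.2 (·.1) (·.2) false).map
    (fun p => PySem.List.slice primes (some p.2) (some (p.2 + p.1)))

-- ===== PRECONDITION & SPEC =====
-- Pre_ excludes non-positive min_length, where A raises IndexError for negative window
-- lengths and, for window length 0, appends n+1 empty slices — an artefact of A's slicing.
def Pre_find_consecutive_prime_sums (primes : List Int) (target : Int) (min_length : Int) (max_length : Int) : Prop :=
  1 ≤ min_length
instance (primes : List Int) (target : Int) (min_length : Int) (max_length : Int) : Decidable (Pre_find_consecutive_prime_sums primes target min_length max_length) := by
  unfold Pre_find_consecutive_prime_sums; infer_instance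

def pvWitness_find_consecutive_prime_sums : List Int × Int × Int × Int := ([2, 3, 5], 5, 1, 2)

-- On inputs where some window of an allowed length sums to target but an earlier window of the
-- same length sums to more than target (possible whenever primes is not sorted ascending), A's
-- early break silently drops that sequence while B returns it — the documented find-all behaviour.
def D_find_consecutive_prime_sums (primes : List Int) (target : Int) (min_length : Int) (max_length : Int) : Prop :=
  ∃ L ∈ PySem.List.pyRange (max min_length 1) (min (max_length + 1) ((primes.length : Int) + 1)) 1,
    ∃ t ∈ PySem.List.pyRange 0 ((primes.length : Int) - L + 1) 1,
      ((primes.drop t.toNat).take L.toNat).sum = target ∧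
      ∃ s ∈ PySem.List.pyRange 0 t 1, target < ((primes.drop s.toNat).take L.toNat).sum
instance (primes : List Int) (target : Int) (min_length : Int) (max_length : Int) : Decidable (D_find_consecutive_prime_sums primes target min_length max_length) := by
  unfold D_find_consecutive_prime_sums; infer_instance

def Spec_find_consecutive_prime_sums (primes : List Int) (target : Int) (min_length : Int) (max_length : Int) (out : List (List Int)) : Prop := ¬ D_find_consecutive_prime_sums primes target min_length max_length → out = find_consecutive_prime_sums_alt primes target min_length max_length
instance (primes : List Int) (target : Int) (min_length : Int) (max_length : Int) (out : List (List Int)) : Decidable (Spec_find_consecutive_prime_sums primes target min_length max_length out) := by unfold Spec_find_consecutive_prime_sums; infer_instance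

def pvDiffWitness_find_consecutive_prime_sums : List Int × Int × Int × Int := ([5, 1, 1], 2, 2, 2)
def pvDiffWitnessOut_find_consecutive_prime_sums : (List (List Int)) × (List (List Int)) := ([], [[1, 1]])

-- ===== CLAIM (what is proved, stated in full; the proofs are below) =====
def Claim_unchanged_find_consecutive_prime_sums : Prop := ∀ (primes : List Int) (target : Int) (min_length : Int) (max_length : Int), Dom_find_consecutive_prime_sums primes target min_length max_length → Pre_find_consecutive_prime_sums primes target min_length max_length → Spec_find_consecutive_prime_sums primes target min_length max_length (find_consecutive_prime_sums primes target min_length max_length)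
def Claim_changed_find_consecutive_prime_sums : Prop := Dom_find_consecutive_prime_sums (pvDiffWitness_find_consecutive_prime_sums.1) (pvDiffWitness_find_consecutive_prime_sums.2.1) (pvDiffWitness_find_consecutive_prime_sums.2.2.1) (pvDiffWitness_find_consecutive_prime_sums.2.2.2) ∧ Pre_find_consecutive_prime_sums (pvDiffWitness_find_consecutive_prime_sums.1) (pvDiffWitness_find_consecutive_prime_sums.2.1) (pvDiffWitness_find_consecutive_prime_sums.2.2.1) (pvDiffWitness_find_consecutive_prime_sums.2.2.2) ∧ D_find_consecutive_prime_sums (pvDiffWitness_find_consecutive_prime_sums.1) (pvDiffWitness_find_consecutive_prime_sums.2.1) (pvDiffWitness_find_consecutive_prime_sums.2.2.1) (pvDiffWitness_find_consecutive_prime_sums.2.2.2) ∧ find_consecutive_prime_sums (pvDiffWitness_find_consecutive_prime_sums.1) (pvDiffWitness_find_consecutive_prime_sums.2.1) (pvDiffWitness_find_consecutive_prime_sums.2.2.1) (pvDiffWitness_find_consecutive_prime_sums.2.2.2) = pvDiffWitnessOut_find_consecutive_prime_sums.1 ∧ find_consecutive_prime_sums_alt (pvDiffWitness_find_consecutive_prime_sums.1)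 (pvDiffWitness_find_consecutive_prime_sums.2.1) (pvDiffWitness_find_consecutive_prime_sums.2.2.1) (pvDiffWitness_find_consecutive_prime_sums.2.2.2) = pvDiffWitnessOut_find_consecutive_prime_sums.2 ∧ pvDiffWitnessOut_find_consecutive_prime_sums.1 ≠ pvDiffWitnessOut_find_consecutive_prime_sums.2

def Claim_exact_find_consecutive_prime_sums : Prop := ∀ (primes : List Int) (target : Int) (min_length : Int) (max_length : Int), Dom_find_consecutive_prime_sums primes target min_length max_length → Pre_find_consecutive_prime_sums primes target min_length max_length → D_find_consecutive_prime_sums primes target min_length max_length → find_consecutive_prime_sums primes target min_length max_length ≠ find_consecutive_prime_sums_alt primes target min_length max_length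

-- ===== LEMMAS AND PROOFS =====

-- prefix sums: pvT xs j = sum of the first j elements
def pvT (xs : List Int) (j : Nat) : Int := (xs.take j).sum
-- Int-index form (used for indices 0 ≤ j ≤ n)
def pvP (xs : List Int) (j : Int) : Int := pvT xs j.toNat
-- window sum of length L starting at s
def pvW (xs : List Int) (L s : Int) : Int := pvP xs (s + L) - pvP xs s

def pvPrefix (xs : List Int) (a : Int) : List Int :=
  match xs with
  | [] => [a]
  | x :: r => a :: pvPrefix r (a + x)

lemma pvT_succ (xs : List Int) (j : Nat) :
    pvT xs (j + 1) = pvT xs j + xs.getD j 0 := by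
  simp only [pvT, List.take_add_one, List.getD]
  cases h : xs[j]? <;> simp

lemma pvP_succ (xs : List Int) (j : Int) (h0 : 0 ≤ j) (hn : j < xs.length) :
    pvP xs (j + 1) = pvP xs j + PySem.List.pyGetD xs j 0 := by
  obtain ⟨k, rfl⟩ : ∃ k : Nat, (k : Int) = j := ⟨j.toNat, by omega⟩
  have hk : k < xs.length := by exact_mod_cast hn
  rw [PySem.List.pyGetD_natCast]
  have e1 : ((k : Int) + 1).toNat = k + 1 := by omega
  have e2 : ((k : Int)).toNat = k := by omega
  simp only [pvP, e1, e2, pvT_succ]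

-- D_'s window sum in prefix form
lemma pv_winsum_eq (xs : List Int) (L s : Int) (hs : 0 ≤ s) (hL : 0 ≤ L) :
    ((xs.drop s.toNat).take L.toNat).sum = pvP xs (s + L) - pvP xs s := by
  have e : (s + L).toNat = s.toNat + L.toNat := by omega
  simp only [pvP, e, pvT, List.take_add, List.sum_append]
  ring


-- building the prefix list by appending 'last + p' is pvPrefix
lemma pvFoldPrefix (xs : List Int) : ∀ (l : List Int) (a : Int),
    xs.foldl (fun pr p => pr ++ [PySem.List.pyGetD pr (-1) 0 + p]) (l ++ [a]) = l ++ pvPrefix xs a := by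
  induction xs with
  | nil => intro l a; simp [pvPrefix]
  | cons x r ih =>
    intro l a
    have hlast : PySem.List.pyGetD (l ++ [a]) (-1) 0 = a := by
      simp [PySem.List.pyGetD, PySem.List.pyGet?, PySem.List.pyIdx?]
    have h := ih (l ++ [a]) (a + x)
    simp only [List.foldl_cons, hlast, pvPrefix]
    simpa [List.append_assoc] using h

lemma pvPrefix_getD (xs : List Int) (a : Int) :
    ∀ j : Nat, j ≤ xs.length → (pvPrefix xs a).getD j 0 = a + pvT xs j := by
  induction xs generalizing a with
  | nil =>
    intro j hj
    have : j = 0 := by simpa using hj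
    subst this; simp [pvPrefix, pvT]
  | cons x r ih =>
    intro j hj
    cases j with
    | zero => simp [pvPrefix, pvT]
    | succ k =>
      have h := ih (a + x) k (by simpa using hj)
      simp only [pvPrefix, List.getD_cons_succ, pvT, List.take_succ_cons, List.sum_cons] at *
      omega

lemma pvPrefix_pyGetD (xs : List Int) (j : Int) (h0 : 0 ≤ j) (hj : j ≤ xs.length) :
    PySem.List.pyGetD (pvPrefix xs 0) j 0 = pvP xs j := by
  obtain ⟨k, rfl⟩ : ∃ k : Nat, (k : Int) = j := ⟨j.toNat, by omega⟩
  rw [PySem.List.pyGetD_natCast]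
  have hk : k ≤ xs.length := by exact_mod_cast hj
  have := pvPrefix_getD xs 0 k hk
  simpa [pvP] using this

-- the canonical per-length match list and target hit list
def pvM (xs : List Int) (target L : Int) : List Int :=
  (PySem.List.pyRange 0 ((xs.length : Int) - L + 1) 1).filter (fun s => decide (pvW xs L s = target))
def pvLens (xs : List Int) (mn mx : Int) : List Int :=
  PySem.List.pyRange mn (min (mx + 1) ((xs.length : Int) + 1)) 1
def pvThits (xs : List Int) (target mn mx : Int) : List (Int × Int) :=
  (pvLens xs mn mx).flatMap (fun L => (pvM xs target L).map (fun s => (L, s)))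
def pvSliceF (xs : List Int) (p : Int × Int) : List Int :=
  PySem.List.slice xs (some p.2) (some (p.2 + p.1))

lemma pvP_zero (xs : List Int) : pvP xs 0 = 0 := by simp [pvP, pvT]

lemma pvInnerA_cons (p : List Int) (t l i : Int) (rest : List Int) (cs : Int) (acc : List (List Int)) :
    pvInnerA p t l (i :: rest) cs acc =
      (let cs' := if i > 0 then cs - PySem.List.pyGetD p (i - 1) 0 + PySem.List.pyGetD p (i + l - 1) 0 else cs
       if cs' = t then pvInnerA p t l rest cs' (acc ++ [PySem.List.slice p (some i) (some (i + l))])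
       else if cs' > t then acc
       else pvInnerA p t l rest cs' acc) := rfl

-- A's inner loop, assuming no match of this length occurs after an exceeding window
lemma pvInnerA_noskip (xs : List Int) (target L : Int) (hL : 1 ≤ L) (hLn : L ≤ (xs.length : Int)) :
    ∀ (k : Nat) (i cs : Int) (acc : List (List Int)), 0 ≤ i →
      i + k = (xs.length : Int) - L + 1 →
      cs = pvW xs L (max (i - 1) 0) →
      (∀ s t : Int, i ≤ s → s < t → t < (xs.length : Int) - L + 1 →
        target < pvW xs L s → pvW xs L t ≠ target) →
      pvInnerA xs target L (PySem.List.pyRange i ((xs.length : Int) - L + 1) 1) cs acc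
        = acc ++ ((PySem.List.pyRange i ((xs.length : Int) - L + 1) 1).filter
            (fun s => decide (pvW xs L s = target))).map
            (fun s => PySem.List.slice xs (some s) (some (s + L))) := by
  intro k
  induction k with
  | zero =>
    intro i cs acc h0 hik hcs hns
    rw [PySem.List.pyRange_one_eq_nil (by omega)]
    simp [pvInnerA]
  | succ k ih =>
    intro i cs acc h0 hik hcs hns
    have hib : i < (xs.length : Int) - L + 1 := by omega
    have hwin : (if i > 0 then
        cs - PySem.List.pyGetD xs (i - 1) 0 + PySem.List.pyGetD xs (i + L - 1) 0
      else cs) = pvW xs L i := by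
      by_cases hi : i > 0
      · rw [if_pos hi]
        have e1 : max (i - 1) 0 = i - 1 := by omega
        have s1 : pvP xs ((i - 1) + 1) = pvP xs (i - 1) + PySem.List.pyGetD xs (i - 1) 0 :=
          pvP_succ xs (i - 1) (by omega) (by omega)
        have s2 : pvP xs ((i + L - 1) + 1) = pvP xs (i + L - 1) + PySem.List.pyGetD xs (i + L - 1) 0 :=
          pvP_succ xs (i + L - 1) (by omega) (by omega)
        have e2 : (i - 1) + 1 = i := by ring
        have e3 : (i + L - 1) + 1 = i + L := by ring
        have e4 : i - 1 + L = i + L - 1 := by ring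
        rw [e2] at s1; rw [e3] at s2
        rw [hcs]; unfold pvW; rw [e1, e4]; omega
      · have hi0 : i = 0 := by omega
        subst hi0; rw [if_neg (by omega)]; simpa using hcs
    have hrec := fun (acc' : List (List Int)) => ih (i + 1) (pvW xs L i) acc' (by omega) (by omega)
      (by have e : max (i + 1 - 1) 0 = i := by omega
          rw [e])
      (fun s t hs ht hb hx => hns s t (by omega) ht hb hx)
    rw [PySem.List.pyRange_one_cons hib, pvInnerA_cons]
    simp only [hwin]
    by_cases h1 : pvW xs L i = target
    · rw [if_pos h1, hrec]
      simp [h1, List.append_assoc]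
    · by_cases h2 : target < pvW xs L i
      · rw [if_neg h1, if_pos h2]
        have hfil : List.filter (fun s => decide (pvW xs L s = target))
            (i :: PySem.List.pyRange (i + 1) ((xs.length : Int) - L + 1) 1) = [] := by
          rw [List.filter_eq_nil_iff]
          intro s hs
          rcases List.mem_cons.mp hs with rfl | hs'
          · simpa using h1
          · rw [PySem.List.mem_pyRange_one] at hs'
            simpa using hns i s le_rfl (by omega) hs'.2 h2
        rw [hfil]; simp
      · rw [if_neg h1, if_neg (by omega : ¬ pvW xs L i > target), hrec]
        simp [h1]

-- A equals the canonical flatMap when no allowed-length match follows an exceeding window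
lemma pvA_eq (xs : List Int) (target mn mx : Int) (hPre : 1 ≤ mn)
    (hD : ¬ D_find_consecutive_prime_sums xs target mn mx) :
    find_consecutive_prime_sums xs target mn mx
      = (pvLens xs mn mx).flatMap
          (fun L => (pvM xs target L).map (fun s => PySem.List.slice xs (some s) (some (s + L)))) := by
  simp only [find_consecutive_prime_sums]
  have hcong : ∀ (acc : List (List Int)), ∀ L ∈ pvLens xs mn mx,
      pvInnerA xs target L (PySem.List.pyRange 0 ((xs.length : Int) - L + 1) 1)
        (PySem.List.slice xs none (some L)).sum acc
      = acc ++ (pvM xs target L).map (fun s => PySem.List.slice xs (some s) (some (s + L))) := by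
    intro acc L hmem
    rw [pvLens, PySem.List.mem_pyRange_one] at hmem
    have hL1 : 1 ≤ L := by omega
    have hLn : L ≤ (xs.length : Int) := by omega
    have hcs : (PySem.List.slice xs none (some L)).sum = pvW xs L (max (0 - 1) 0) := by
      obtain ⟨b, rfl⟩ : ∃ b : Nat, (b : Int) = L := ⟨L.toNat, by omega⟩
      rw [PySem.List.slice_to_natCast]
      have e : max ((0 : Int) - 1) 0 = 0 := by omega
      rw [e]
      unfold pvW
      rw [pvP_zero]
      simp [pvP, pvT]
    have hns : ∀ s t : Int, 0 ≤ s → s < t → t < (xs.length : Int) - L + 1 →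
        target < pvW xs L s → pvW xs L t ≠ target := by
      intro s t hs hst htb hgt heq
      apply hD
      refine ⟨L, ?_, t, ?_, ?_, s, ?_, ?_⟩
      · rw [PySem.List.mem_pyRange_one]; omega
      · rw [PySem.List.mem_pyRange_one]; omega
      · rw [pv_winsum_eq xs L t (by omega) (by omega)]; exact heq
      · rw [PySem.List.mem_pyRange_one]; omega
      · rw [pv_winsum_eq xs L s (by omega) (by omega)]; exact hgt
    have h := pvInnerA_noskip xs target L hL1 hLn ((xs.length : Int) - L + 1).toNat 0 _ acc
      le_rfl (by omega) hcs hns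
    rw [h]; rfl
  rw [show PySem.List.pyRange mn (min (mx + 1) ((xs.length : Int) + 1)) 1 = pvLens xs mn mx from rfl]
  rw [PySem.List.foldl_congr_mem _ _
      (fun seqs L => seqs ++ (pvM xs target L).map (fun s => PySem.List.slice xs (some s) (some (s + L))))
      _ hcong]
  rw [PySem.List.foldl_append_eq_flatMap]
  simp

-- the hit list B's j-loop produces, in end-major order
def pvHit (pre : List Int) (target mn mx j : Int) : List (Int × Int) :=
  (((PySem.List.pyRange 0 j 1).filter
      (fun i => PySem.List.pyGetD pre i 0 == PySem.List.pyGetD pre j 0 - target)).filter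
    (fun i => decide (mn ≤ j - i ∧ j - i ≤ mx))).map (fun i => (j - i, i))

def pvHits (xs : List Int) (target mn mx : Int) : List (Int × Int) :=
  (PySem.List.pyRange 0 ((xs.length : Int) + 1) 1).flatMap (pvHit (pvPrefix xs 0) target mn mx)

lemma pvLoopB_cons (pre : List Int) (target mn mx j : Int) (rest : List Int)
    (seen : PySem.Dict Int (List Int)) (hits : List (Int × Int)) :
    pvLoopB pre target mn mx (j :: rest) seen hits =
      (let v := PySem.List.pyGetD pre j 0
       let hits' := (seen.getD (v - target) []).foldl
         (fun h i => if mn ≤ j - i ∧ j - i ≤ mx then h ++ [(j - i, i)] else h) hits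
       pvLoopB pre target mn mx rest (seen.modify v [] (· ++ [j])) hits') := rfl

-- running B's loop from index m with the dict holding all earlier prefix indices
lemma pvLoopB_run (pre : List Int) (target mn mx b : Int) :
    ∀ (k : Nat) (m : Int) (seen : PySem.Dict Int (List Int)) (hits : List (Int × Int)),
      0 ≤ m → m + k = b →
      (∀ v : Int, seen.getD v [] =
        (PySem.List.pyRange 0 m 1).filter (fun j => PySem.List.pyGetD pre j 0 == v)) →
      (pvLoopB pre target mn mx (PySem.List.pyRange m b 1) seen hits).2
        = hits ++ (PySem.List.pyRange m b 1).flatMap (pvHit pre target mn mx) := by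
  intro k
  induction k with
  | zero =>
    intro m seen hits h0 hk hseen
    rw [PySem.List.pyRange_one_eq_nil (by omega)]
    simp [pvLoopB]
  | succ k ih =>
    intro m seen hits h0 hk hseen
    have hmb : m < b := by omega
    rw [PySem.List.pyRange_one_cons hmb, pvLoopB_cons]
    simp only []
    rw [hseen, PySem.List.foldl_append_ite]
    have hseen' : ∀ v : Int, ((seen.modify (PySem.List.pyGetD pre m 0) [] (· ++ [m])).getD v []) =
        (PySem.List.pyRange 0 (m + 1) 1).filter (fun j => PySem.List.pyGetD pre j 0 == v) := by
      intro v
      rw [PySem.Dict.getD_modify, PySem.List.pyRange_one_succ_right (by omega), List.filter_append,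
          hseen]
      by_cases hv : v = PySem.List.pyGetD pre m 0
      · rw [if_pos hv, hv]; simp
      · rw [if_neg hv]
        have hne : (PySem.List.pyGetD pre m 0 == v) = false :=
          beq_eq_false_iff_ne.mpr (fun hc => hv hc.symm)
        simp [hne, hseen]
    rw [ih (m + 1) _ _ (by omega) (by omega) hseen']
    rw [List.flatMap_cons]
    unfold pvHit
    simp [List.append_assoc]

lemma pvAlt_eq_hits (xs : List Int) (target mn mx : Int) :
    find_consecutive_prime_sums_alt xs target mn mx
      = (PySem.List.sorted2 (pvHits xs target mn mx) (·.1) (·.2) false).map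
          (fun p => PySem.List.slice xs (some p.2) (some (p.2 + p.1))) := by
  simp only [find_consecutive_prime_sums_alt]
  have hpre : xs.foldl (fun pr p => pr ++ [PySem.List.pyGetD pr (-1) 0 + p]) [0] = pvPrefix xs 0 := by
    simpa using pvFoldPrefix xs [] 0
  rw [hpre]
  have hrun := pvLoopB_run (pvPrefix xs 0) target mn mx ((xs.length : Int) + 1)
    ((xs.length : Int) + 1).toNat 0 PySem.Dict.empty [] le_rfl (by omega)
    (by intro v
        rw [PySem.List.pyRange_one_eq_nil le_rfl]
        simp [PySem.Dict.getD_empty])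
  rw [hrun]
  simp [pvHits]

-- membership characterisations
lemma mem_pvHits (xs : List Int) (target mn mx : Int) (q : Int × Int) :
    q ∈ pvHits xs target mn mx ↔
      (mn ≤ q.1 ∧ q.1 ≤ mx ∧ 1 ≤ q.1 ∧ 0 ≤ q.2 ∧ q.2 + q.1 ≤ (xs.length : Int) ∧
        pvW xs q.1 q.2 = target) := by
  unfold pvHits pvHit
  rw [List.mem_flatMap]
  constructor
  · rintro ⟨j, hj, hq⟩
    rw [PySem.List.mem_pyRange_one] at hj
    rw [List.mem_map] at hq
    obtain ⟨i, hi, rfl⟩ := hq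
    rw [List.mem_filter] at hi
    obtain ⟨hi1, hcond⟩ := hi
    rw [List.mem_filter] at hi1
    obtain ⟨hir, hkey⟩ := hi1
    rw [PySem.List.mem_pyRange_one] at hir
    rw [pvPrefix_pyGetD xs i (by omega) (by omega),
        pvPrefix_pyGetD xs j (by omega) (by omega)] at hkey
    have hkey' : pvP xs i = pvP xs j - target := by simpa using hkey
    have hcond' : mn ≤ j - i ∧ j - i ≤ mx := by simpa using hcond
    refine ⟨hcond'.1, hcond'.2, by omega, by omega, by omega, ?_⟩
    show pvP xs (i + (j - i)) - pvP xs i = target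
    have e : i + (j - i) = j := by ring
    rw [e]; omega
  · rintro ⟨h1, h2, h3, h4, h5, h6⟩
    refine ⟨q.2 + q.1, by rw [PySem.List.mem_pyRange_one]; omega, ?_⟩
    rw [List.mem_map]
    refine ⟨q.2, ?_, ?_⟩
    · rw [List.mem_filter]
      refine ⟨?_, by simp; omega⟩
      rw [List.mem_filter]
      refine ⟨by rw [PySem.List.mem_pyRange_one]; omega, ?_⟩
      rw [pvPrefix_pyGetD xs q.2 (by omega) (by omega),
          pvPrefix_pyGetD xs (q.2 + q.1) (by omega) (by omega)]
      have : pvP xs q.2 = pvP xs (q.2 + q.1) - target := by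
        unfold pvW at h6; omega
      simp [this]
    · have e : q.2 + q.1 - q.2 = q.1 := by ring
      rw [e]

lemma mem_pvThits (xs : List Int) (target mn mx : Int) (q : Int × Int) :
    q ∈ pvThits xs target mn mx ↔
      (mn ≤ q.1 ∧ q.1 < min (mx + 1) ((xs.length : Int) + 1) ∧ 0 ≤ q.2 ∧
        q.2 < (xs.length : Int) - q.1 + 1 ∧ pvW xs q.1 q.2 = target) := by
  unfold pvThits pvLens pvM
  rw [List.mem_flatMap]
  constructor
  · rintro ⟨L, hL, hq⟩
    rw [PySem.List.mem_pyRange_one] at hL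
    rw [List.mem_map] at hq
    obtain ⟨s, hs, rfl⟩ := hq
    rw [List.mem_filter, PySem.List.mem_pyRange_one] at hs
    exact ⟨hL.1, hL.2, hs.1.1, hs.1.2, by simpa using hs.2⟩
  · rintro ⟨h1, h2, h3, h4, h5⟩
    refine ⟨q.1, by rw [PySem.List.mem_pyRange_one]; omega, ?_⟩
    rw [List.mem_map]
    exact ⟨q.2, by rw [List.mem_filter, PySem.List.mem_pyRange_one]
                   exact ⟨⟨h3, h4⟩, by simpa using h5⟩, Prod.mk.eta⟩

-- Thits is strictly increasing in the (length, start) lexicographic order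
lemma pvThits_pairwise (xs : List Int) (target mn mx : Int) :
    (pvThits xs target mn mx).Pairwise
      (fun a b => a.1 < b.1 ∨ (a.1 = b.1 ∧ a.2 < b.2)) := by
  unfold pvThits
  rw [List.pairwise_flatMap]
  constructor
  · intro L hL
    apply List.Pairwise.map (S := fun a b => a.1 < b.1 ∨ (a.1 = b.1 ∧ a.2 < b.2))
      (fun s => (L, s)) (fun a b h => Or.inr ⟨rfl, h⟩)
    exact (PySem.List.pairwise_lt_pyRange_one _ _).filter _
  · apply List.Pairwise.imp ?_ (PySem.List.pairwise_lt_pyRange_one _ _)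
    intro L1 L2 h x hx y hy
    rw [List.mem_map] at hx hy
    obtain ⟨s1, _, rfl⟩ := hx
    obtain ⟨s2, _, rfl⟩ := hy
    exact Or.inl h

lemma pvThits_nodup (xs : List Int) (target mn mx : Int) :
    (pvThits xs target mn mx).Nodup := by
  apply List.Pairwise.imp ?_ (pvThits_pairwise xs target mn mx)
  intro a b h he
  subst he
  rcases h with h | ⟨h1, h2⟩ <;> omega

lemma pvHits_nodup (xs : List Int) (target mn mx : Int) :
    (pvHits xs target mn mx).Nodup := by
  unfold pvHits
  rw [List.nodup_flatMap]
  constructor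
  · intro j hj
    unfold pvHit
    apply List.Nodup.map
    · intro a b h
      simpa using congrArg Prod.snd h
    · exact ((PySem.List.nodup_pyRange_one _ _).filter _).filter _
  · apply List.Pairwise.imp ?_ (PySem.List.pairwise_lt_pyRange_one _ _)
    intro j1 j2 h q hq1 hq2
    unfold pvHit at hq1 hq2
    rw [List.mem_map] at hq1 hq2
    obtain ⟨i1, _, rfl⟩ := hq1
    obtain ⟨i2, hm2, he⟩ := hq2
    have e1 : i2 = i1 := by simpa using congrArg Prod.snd he
    have e2 : j2 - i2 = j1 - i1 := by simpa using congrArg Prod.fst he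
    omega

lemma pvThits_perm_pvHits (xs : List Int) (target mn mx : Int) (hPre : 1 ≤ mn) :
    (pvThits xs target mn mx).Perm (pvHits xs target mn mx) := by
  rw [List.perm_ext_iff_of_nodup (pvThits_nodup xs target mn mx) (pvHits_nodup xs target mn mx)]
  intro q
  rw [mem_pvThits, mem_pvHits]
  constructor
  · rintro ⟨a, b, c, d, e⟩
    exact ⟨a, by omega, by omega, c, by omega, e⟩
  · rintro ⟨a, b, c, d, e, f⟩
    exact ⟨a, by omega, d, by omega, f⟩

-- Python's tuple sort is the lexicographic-key sort
lemma pvSorted2_eq_sorted (l : List (Int × Int)) :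
    PySem.List.sorted2 l (·.1) (·.2) false
      = PySem.List.sorted l (fun p => toLex p) false := by
  have hb : (fun (a b : Int × Int) => decide (a.1 < b.1) || (!decide (b.1 < a.1) && decide (a.2 < b.2)))
      = (fun (a b : Int × Int) => decide (toLex a < toLex b)) := by
    funext a b
    rcases lt_trichotomy a.1 b.1 with h | h | h
    · have h' : ¬ b.1 < a.1 := by omega
      simp [Prod.Lex.lt_iff, h, h']
    · simp [Prod.Lex.lt_iff, h]
    · have h' : ¬ a.1 < b.1 := by omega
      have h'' : ¬ a.1 = b.1 := by omega
      simp [Prod.Lex.lt_iff, h, h', h'']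
  show List.foldl (fun acc x => PySem.List.insertBy
      (fun a b => decide (a.1 < b.1) || (!decide (b.1 < a.1) && decide (a.2 < b.2))) x acc) [] l
    = List.foldl (fun acc x => PySem.List.insertBy
      (fun a b => decide (toLex a < toLex b)) x acc) [] l
  rw [hb]

lemma pvSorted_hits (xs : List Int) (target mn mx : Int) (hPre : 1 ≤ mn) :
    PySem.List.sorted2 (pvHits xs target mn mx) (·.1) (·.2) false = pvThits xs target mn mx := by
  rw [pvSorted2_eq_sorted]
  apply PySem.List.sorted_eq_of_perm_of_pairwise_lt _ _ (fun p => toLex p)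
    (pvThits_perm_pvHits xs target mn mx hPre)
  apply List.Pairwise.imp ?_ (pvThits_pairwise xs target mn mx)
  intro a b h
  rw [Prod.Lex.lt_iff]
  simpa using h

-- B equals the same canonical flatMap (no hypothesis on D_ needed)
lemma pvB_eq (xs : List Int) (target mn mx : Int) (hPre : 1 ≤ mn) :
    find_consecutive_prime_sums_alt xs target mn mx
      = (pvLens xs mn mx).flatMap
          (fun L => (pvM xs target L).map (fun s => PySem.List.slice xs (some s) (some (s + L)))) := by
  rw [pvAlt_eq_hits, pvSorted_hits xs target mn mx hPre]
  unfold pvThits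
  rw [List.map_flatMap]
  simp [List.map_map, Function.comp_def]

-- full characterisation of A's inner loop: kept matches are those before the first exceeding window
def pvMA (xs : List Int) (target L : Int) : List Int :=
  ((PySem.List.pyRange 0 ((xs.length : Int) - L + 1) 1).takeWhile
      (fun s => decide (pvW xs L s ≤ target))).filter (fun s => decide (pvW xs L s = target))

lemma pvInnerA_gen (xs : List Int) (target L : Int) (hL : 1 ≤ L) (hLn : L ≤ (xs.length : Int)) :
    ∀ (k : Nat) (i cs : Int) (acc : List (List Int)), 0 ≤ i →
      i + k = (xs.length : Int) - L + 1 →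
      cs = pvW xs L (max (i - 1) 0) →
      pvInnerA xs target L (PySem.List.pyRange i ((xs.length : Int) - L + 1) 1) cs acc
        = acc ++ (((PySem.List.pyRange i ((xs.length : Int) - L + 1) 1).takeWhile
              (fun s => decide (pvW xs L s ≤ target))).filter
            (fun s => decide (pvW xs L s = target))).map
            (fun s => PySem.List.slice xs (some s) (some (s + L))) := by
  intro k
  induction k with
  | zero =>
    intro i cs acc h0 hik hcs
    rw [PySem.List.pyRange_one_eq_nil (by omega)]
    simp [pvInnerA]
  | succ k ih =>
    intro i cs acc h0 hik hcs
    have hib : i < (xs.length : Int) - L + 1 := by omega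
    have hwin : (if i > 0 then
        cs - PySem.List.pyGetD xs (i - 1) 0 + PySem.List.pyGetD xs (i + L - 1) 0
      else cs) = pvW xs L i := by
      by_cases hi : i > 0
      · rw [if_pos hi]
        have e1 : max (i - 1) 0 = i - 1 := by omega
        have s1 : pvP xs ((i - 1) + 1) = pvP xs (i - 1) + PySem.List.pyGetD xs (i - 1) 0 :=
          pvP_succ xs (i - 1) (by omega) (by omega)
        have s2 : pvP xs ((i + L - 1) + 1) = pvP xs (i + L - 1) + PySem.List.pyGetD xs (i + L - 1) 0 :=
          pvP_succ xs (i + L - 1) (by omega) (by omega)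
        have e2 : (i - 1) + 1 = i := by ring
        have e3 : (i + L - 1) + 1 = i + L := by ring
        have e4 : i - 1 + L = i + L - 1 := by ring
        rw [e2] at s1; rw [e3] at s2
        rw [hcs]; unfold pvW; rw [e1, e4]; omega
      · have hi0 : i = 0 := by omega
        subst hi0; rw [if_neg (by omega)]; simpa using hcs
    have hrec := fun (acc' : List (List Int)) => ih (i + 1) (pvW xs L i) acc' (by omega) (by omega)
      (by have e : max (i + 1 - 1) 0 = i := by omega
          rw [e])
    rw [PySem.List.pyRange_one_cons hib, pvInnerA_cons]
    simp only [hwin]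
    by_cases h1 : pvW xs L i = target
    · rw [if_pos h1, hrec, List.takeWhile_cons,
          if_pos (by simpa using le_of_eq h1)]
      simp [h1, List.append_assoc]
    · by_cases h2 : target < pvW xs L i
      · rw [if_neg h1, if_pos h2, List.takeWhile_cons,
            if_neg (by simpa using not_le_of_gt h2)]
        simp
      · rw [if_neg h1, if_neg (by omega : ¬ pvW xs L i > target), hrec, List.takeWhile_cons,
            if_pos (by simpa using le_of_not_gt h2)]
        simp [h1]

-- A on any input (inside Pre_) in canonical form
lemma pvA_full (xs : List Int) (target mn mx : Int) (hPre : 1 ≤ mn) :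
    find_consecutive_prime_sums xs target mn mx
      = (pvLens xs mn mx).flatMap
          (fun L => (pvMA xs target L).map (fun s => PySem.List.slice xs (some s) (some (s + L)))) := by
  simp only [find_consecutive_prime_sums]
  have hcong : ∀ (acc : List (List Int)), ∀ L ∈ pvLens xs mn mx,
      pvInnerA xs target L (PySem.List.pyRange 0 ((xs.length : Int) - L + 1) 1)
        (PySem.List.slice xs none (some L)).sum acc
      = acc ++ (pvMA xs target L).map (fun s => PySem.List.slice xs (some s) (some (s + L))) := by
    intro acc L hmem
    rw [pvLens, PySem.List.mem_pyRange_one] at hmem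
    have hL1 : 1 ≤ L := by omega
    have hLn : L ≤ (xs.length : Int) := by omega
    have hcs : (PySem.List.slice xs none (some L)).sum = pvW xs L (max (0 - 1) 0) := by
      obtain ⟨b, rfl⟩ : ∃ b : Nat, (b : Int) = L := ⟨L.toNat, by omega⟩
      rw [PySem.List.slice_to_natCast]
      have e : max ((0 : Int) - 1) 0 = 0 := by omega
      rw [e]
      unfold pvW
      rw [pvP_zero]
      simp [pvP, pvT]
    have h := pvInnerA_gen xs target L hL1 hLn ((xs.length : Int) - L + 1).toNat 0 _ acc
      le_rfl (by omega) hcs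
    rw [h]; rfl
  rw [show PySem.List.pyRange mn (min (mx + 1) ((xs.length : Int) + 1)) 1 = pvLens xs mn mx from rfl]
  rw [PySem.List.foldl_congr_mem _ _
      (fun seqs L => seqs ++ (pvMA xs target L).map (fun s => PySem.List.slice xs (some s) (some (s + L))))
      _ hcong]
  rw [PySem.List.foldl_append_eq_flatMap]
  simp

-- everything kept by takeWhile over an increasing range satisfies the predicate below it
lemma mem_takeWhile_pyRange (p : Int → Bool) : ∀ (k : Nat) (a b : Int), a + k = b →
    ∀ x ∈ (PySem.List.pyRange a b 1).takeWhile p, ∀ y, a ≤ y → y ≤ x → p y = true := by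
  intro k
  induction k with
  | zero =>
    intro a b hk x hx
    rw [PySem.List.pyRange_one_eq_nil (by omega)] at hx
    simp at hx
  | succ k ih =>
    intro a b hk x hx y hy1 hy2
    rw [PySem.List.pyRange_one_cons (by omega), List.takeWhile_cons] at hx
    by_cases hpa : p a = true
    · rw [if_pos hpa] at hx
      rcases List.mem_cons.mp hx with rfl | hx'
      · have hya : y = x := by omega
        rw [hya]; exact hpa
      · by_cases hya : y = a
        · rw [hya]; exact hpa
        · exact ih (a + 1) b (by omega) x hx' y (by omega) hy2
    · rw [if_neg hpa] at hx
      simp at hx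

-- ===== VERDICT (by name: the statement is the Claim_ definition above) =====
theorem find_consecutive_prime_sums_spec : Claim_unchanged_find_consecutive_prime_sums := by
  intro primes target min_length max_length _hDom hPre
  unfold Spec_find_consecutive_prime_sums
  intro hD
  rw [pvA_eq primes target min_length max_length hPre hD,
      pvB_eq primes target min_length max_length hPre]

theorem find_consecutive_prime_sums_changed : Claim_changed_find_consecutive_prime_sums := by
  unfold Claim_changed_find_consecutive_prime_sums; decide

theorem find_consecutive_prime_sums_tight : Claim_exact_find_consecutive_prime_sums := by
  intro xs target mn mx _hDom hPre hD he
  rw [pvA_full xs target mn mx hPre, pvB_eq xs target mn mx hPre] at he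
  obtain ⟨L0, hL0, t0, ht0, ht0sum, s0, hs0, hs0sum⟩ := hD
  rw [PySem.List.mem_pyRange_one] at hL0 ht0 hs0
  have hL1 : 1 ≤ L0 := by omega
  have hLn : L0 ≤ (xs.length : Int) := by omega
  have hw_t : pvW xs L0 t0 = target := by
    have h := pv_winsum_eq xs L0 t0 (by omega) (by omega)
    unfold pvW; omega
  have hw_s : target < pvW xs L0 s0 := by
    have h := pv_winsum_eq xs L0 s0 (by omega) (by omega)
    unfold pvW; omega
  have hmemM : t0 ∈ pvM xs target L0 := by
    unfold pvM
    rw [List.mem_filter, PySem.List.mem_pyRange_one]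
    exact ⟨⟨by omega, by omega⟩, by simpa using hw_t⟩
  have hnmem : t0 ∉ pvMA xs target L0 := by
    intro hmem
    unfold pvMA at hmem
    rw [List.mem_filter] at hmem
    have hle := mem_takeWhile_pyRange (fun s => decide (pvW xs L0 s ≤ target))
      ((xs.length : Int) - L0 + 1 - 0).toNat 0 ((xs.length : Int) - L0 + 1) (by omega)
      t0 hmem.1 s0 (by omega) (by omega)
    simp only [decide_eq_true_eq] at hle
    omega
  have hsub : ∀ L : Int, (pvMA xs target L).Sublist (pvM xs target L) :=
    fun L => (List.takeWhile_sublist _).filter _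
  have hstrict : (pvMA xs target L0).length < (pvM xs target L0).length := by
    rcases lt_or_eq_of_le (hsub L0).length_le with h | h
    · exact h
    · exfalso; apply hnmem; rw [(hsub L0).eq_of_length h]; exact hmemM
  have hL0lens : L0 ∈ pvLens xs mn mx := by
    unfold pvLens
    rw [PySem.List.mem_pyRange_one]
    omega
  have hlenA := congrArg List.length he
  rw [List.length_flatMap, List.length_flatMap] at hlenA
  simp only [List.length_map] at hlenA
  have hlt := List.sum_lt_sum (l := pvLens xs mn mx)
    (fun L => (pvMA xs target L).length) (fun L => (pvM xs target L).length)
    (fun L _ => (hsub L).length_le) ⟨L0, hL0lens, hstrict⟩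
  omega
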